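-- pv_equiv track=rewrite | github.com/bog-walk/project-euler-python | solution/batch1/problem10.py | sum_of_primes_quick_draw
-- ===== SOURCE A (Python) =====
-- def sum_of_primes_quick_draw(n: int) -> list[int]:
--     """
--     Stores the cumulative sum of prime numbers to allow quick access to the
--     answers for multiple N <= n.
--
--     Solution mimics original Sieve of Eratosthenes algorithm that iterates over
--     only odd numbers & their multiples, but uses boolean mask to alter a list of
--     cumulative sums instead of returning a list of prime numbers.
--
--     :returns: List of the cumulative sums of prime numbers <= index.
--     """
--     if n % 2:
--         n += 1
--     boolean_mask = [i > 2 and i % 2 != 0 or i == 2 for i in range(n + 1)]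
--     sums = [0]*(n + 1)
--     sums[2] = 2
--     for i in range(3, n + 1, 2):
--         if boolean_mask[i]:
--             sums[i] = sums[i - 1] + i
--             if i * i < n:
--                 for j in range(i * i, n + 1, 2 * i):
--                     boolean_mask[j] = False
--         else:
--             sums[i] = sums[i - 1]
--         # even number cumulative sum will not have changed
--         sums[i + 1] = sums[i]
--     return sums
-- ===== SOURCE B (Python) =====
-- def _is_prime(i: int) -> bool:
--     """Deterministic trial division by 2 and then odd candidates up to sqrt(i)."""
--     if i < 2:
--         return False
--     if i == 2:
--         return True
--     if i % 2 == 0: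
--         return False
--     d = 3
--     while d * d <= i:
--         if i % d == 0:
--             return False
--         d += 2
--     return True
--
--
-- def sum_of_primes_quick_draw(n: int) -> list[int]:
--     """
--     No sieve at all: test each index for primality by trial division and
--     append a running total of the primes seen so far.
--     """
--     if n % 2:
--         n += 1
--     total = 0
--     sums = []
--     for i in range(n + 1):
--         if _is_prime(i):
--             total += i
--         sums.append(total)
--     return sums
-- ===== Notes on version B (the rewrite author's own statement) =====
-- stated objective: alternative
-- what changed: A builds an odd-only Sieve of Eratosthenes fused with in-place cumulative-sum array updates; B has no sieve at all: it tests each index individually by trial division (odd divisors up to sqrt(i)) and appends a running total of primes seen so far.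
import Mathlib
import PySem

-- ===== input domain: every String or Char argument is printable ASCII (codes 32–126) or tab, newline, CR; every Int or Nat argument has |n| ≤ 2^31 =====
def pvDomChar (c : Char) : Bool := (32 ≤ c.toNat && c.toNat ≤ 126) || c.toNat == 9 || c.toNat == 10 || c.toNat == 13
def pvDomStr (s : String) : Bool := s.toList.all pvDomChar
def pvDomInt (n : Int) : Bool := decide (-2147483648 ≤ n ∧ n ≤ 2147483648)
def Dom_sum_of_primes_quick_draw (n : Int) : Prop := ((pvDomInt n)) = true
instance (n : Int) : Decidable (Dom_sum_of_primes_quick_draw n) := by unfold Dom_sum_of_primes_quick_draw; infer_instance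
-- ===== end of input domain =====

-- B drops A's fused Eratosthenes sieve entirely: it tests each index by trial division
-- (odd divisors up to sqrt) and appends a running total — a different algorithm, not faster.



-- ===== PORT A =====
-- the inner crossing loop `for j in range(i*i, n+1, 2*i): boolean_mask[j] = False`
def pvCrossL (n : Int) (m : List Bool) (i : Int) : List Bool :=
  (PySem.List.pyRange (i * i) (n + 1) (2 * i)).foldl (fun m j => PySem.List.pySetD m j false) m

-- the comprehension body of `boolean_mask = [i > 2 and i % 2 != 0 or i == 2 for i in range(n + 1)]`
def pvInitMask (i : Int) : Bool := (decide (i > 2) && decide (PySem.Int.mod i 2 ≠ 0)) || decide (i = 2)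

-- one iteration of A's fused loop body over the state (boolean_mask, sums);
-- index reads/writes via pyGetD/pySetD (every index is in range under Pre_)
def pvAStepL (n : Int) (st : List Bool × List Int) (i : Int) : List Bool × List Int :=
  if PySem.List.pyGetD st.1 i false then
    let s := PySem.List.pySetD st.2 i (PySem.List.pyGetD st.2 (i - 1) 0 + i)
    let m := if i * i < n then pvCrossL n st.1 i else st.1
    (m, PySem.List.pySetD s (i + 1) (PySem.List.pyGetD s i 0))
  else
    let s := PySem.List.pySetD st.2 i (PySem.List.pyGetD st.2 (i - 1) 0)
    (st.1, PySem.List.pySetD s (i + 1) (PySem.List.pyGetD s i 0))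

def sum_of_primes_quick_draw (n0 : Int) : List Int :=
  let n := if PySem.Int.mod n0 2 ≠ 0 then n0 + 1 else n0
  let boolean_mask : List Bool := (PySem.List.pyRange 0 (n + 1) 1).map pvInitMask
  let sums : List Int := PySem.List.pySetD (List.replicate (n + 1).toNat (0 : Int)) 2 2
  let st := (PySem.List.pyRange 3 (n + 1) 2).foldl (pvAStepL n) (boolean_mask, sums)
  st.2

-- ===== PORT B =====
-- `while d * d <= i: if i % d == 0: return False; d += 2` then `return True`
def pvTrial (i d : Int) : Bool :=
  if i < d * d then true
  else if PySem.Int.mod i d = 0 then false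
  else pvTrial i (d + 2)
termination_by (i + 3 - d).toNat
decreasing_by
  rename_i h _
  have hdd : d * d ≤ i := not_lt.mp h
  have hdi : d ≤ i + 2 := by nlinarith [sq_nonneg (d - 1)]
  omega

-- B's helper `_is_prime`
def pvIsPrime (i : Int) : Bool :=
  if i < 2 then false
  else if i = 2 then true
  else if PySem.Int.mod i 2 = 0 then false
  else pvTrial i 3

def sum_of_primes_quick_draw_alt (n0 : Int) : List Int :=
  let n := if PySem.Int.mod n0 2 ≠ 0 then n0 + 1 else n0
  let st := (PySem.List.pyRange 0 (n + 1) 1).foldl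
      (fun (st : Int × List Int) i =>
        let total := if pvIsPrime i then st.1 + i else st.1
        (total, st.2 ++ [total]))
      ((0 : Int), ([] : List Int))
  st.2

-- ===== PRECONDITION & SPEC =====
-- For n ≤ 0 Python A raises IndexError at `sums[2] = 2` (the list is shorter than 3); Pre_ excludes exactly those.
def Pre_sum_of_primes_quick_draw (n : Int) : Prop := 1 ≤ n
instance (n : Int) : Decidable (Pre_sum_of_primes_quick_draw n) := by unfold Pre_sum_of_primes_quick_draw; infer_instance
def pvWitness_sum_of_primes_quick_draw : Int := 10

def Spec_sum_of_primes_quick_draw (n : Int) (out : List Int) : Prop := out = sum_of_primes_quick_draw_alt n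
instance (n : Int) (out : List Int) : Decidable (Spec_sum_of_primes_quick_draw n out) := by unfold Spec_sum_of_primes_quick_draw; infer_instance

-- ===== CLAIM (what is proved, stated in full; the proofs are below) =====
def Claim_equal_sum_of_primes_quick_draw : Prop := ∀ (n : Int), Dom_sum_of_primes_quick_draw n → Pre_sum_of_primes_quick_draw n → Spec_sum_of_primes_quick_draw n (sum_of_primes_quick_draw n)

-- ===== LEMMAS AND PROOFS =====

-- Proof-side functional model of the array states: cells as total functions Int → value
def pvSetB (f : Int → Bool) (i : Int) (v : Bool) : Int → Bool := fun x => if x = i then v else f x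
def pvSetI (f : Int → Int) (i : Int) (v : Int) : Int → Int := fun x => if x = i then v else f x

def pvCross (n : Int) (m : Int → Bool) (i : Int) : Int → Bool :=
  (PySem.List.pyRange (i * i) (n + 1) (2 * i)).foldl (fun m j => pvSetB m j false) m

def pvAStep (n : Int) (st : (Int → Bool) × (Int → Int)) (i : Int) : (Int → Bool) × (Int → Int) :=
  if st.1 i then
    let s := pvSetI st.2 i (st.2 (i - 1) + i)
    let m := if i * i < n then pvCross n st.1 i else st.1
    (m, pvSetI s (i + 1) (s i))
  else
    let s := pvSetI st.2 i (st.2 (i - 1))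
    (st.1, pvSetI s (i + 1) (s i))

theorem mat_getD {α : Type} (f : Int → α) (d : α) (b i : Int) (h0 : 0 ≤ i) (hb : i < b) :
    PySem.List.pyGetD ((PySem.List.pyRange 0 b 1).map f) i d = f i :=
  PySem.List.pyGetD_map_pyRange_of_nonneg f b i d h0 hb

theorem mat_set {α : Type} (f : Int → α) (b i : Int) (v : α) (h0 : 0 ≤ i) :
    PySem.List.pySetD ((PySem.List.pyRange 0 b 1).map f) i v
      = (PySem.List.pyRange 0 b 1).map (fun x => if x = i then v else f x) := by
  rw [PySem.List.pySetD_of_nonneg _ v h0]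
  apply List.ext_getElem
  · simp
  · intro k hk1 hk2
    simp only [List.getElem_set, List.getElem_map, PySem.List.getElem_pyRange_one]
    split_ifs <;> first | rfl | omega

theorem cross_mat (b : Int) (Lc : List Int) : ∀ (m : Int → Bool),
    (∀ j ∈ Lc, 0 ≤ j) →
    Lc.foldl (fun xs j => PySem.List.pySetD xs j false) ((PySem.List.pyRange 0 b 1).map m)
      = (PySem.List.pyRange 0 b 1).map (Lc.foldl (fun m j => pvSetB m j false) m) := by
  induction Lc with
  | nil => intro m _; rfl
  | cons j T ih =>
    intro m h
    simp only [List.foldl_cons]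
    rw [mat_set m b j false (h j List.mem_cons_self)]
    exact ih _ (fun x hx => h x (List.mem_cons_of_mem _ hx))

theorem crossL_mat (n b i : Int) (m : Int → Bool) (h3 : 3 ≤ i) :
    pvCrossL n ((PySem.List.pyRange 0 b 1).map m) i
      = (PySem.List.pyRange 0 b 1).map (pvCross n m i) := by
  unfold pvCrossL pvCross
  apply cross_mat
  intro j hj
  rcases (PySem.List.mem_pyRange_iff_of_pos (by omega : (0:Int) < 2 * i) j).mp hj with ⟨h1, _, _⟩
  nlinarith

theorem stepA_mat (n i : Int) (m : Int → Bool) (s : Int → Int)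
    (h3 : 3 ≤ i) (hub : i + 1 ≤ n) :
    pvAStepL n ((PySem.List.pyRange 0 (n+1) 1).map m, (PySem.List.pyRange 0 (n+1) 1).map s) i
      = ((PySem.List.pyRange 0 (n+1) 1).map (pvAStep n (m, s) i).1,
         (PySem.List.pyRange 0 (n+1) 1).map (pvAStep n (m, s) i).2) := by
  unfold pvAStepL pvAStep
  rw [mat_getD m false (n+1) i (by omega) (by omega)]
  by_cases hm : m i <;> simp only [hm, if_true, if_false, Bool.false_eq_true]
  · rw [mat_getD s 0 (n+1) (i-1) (by omega) (by omega),
      mat_set s (n+1) i (s (i-1) + i) (by omega)]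
    have hm2 : (fun x => if x = i then s (i-1) + i else s x) = pvSetI s i (s (i-1) + i) := rfl
    rw [hm2, mat_getD (pvSetI s i (s (i-1) + i)) 0 (n+1) i (by omega) (by omega),
      mat_set (pvSetI s i (s (i-1) + i)) (n+1) (i+1) _ (by omega)]
    refine Prod.ext ?_ ?_
    · show (if i * i < n then pvCrossL n ((PySem.List.pyRange 0 (n+1) 1).map m) i else _) = _
      split
      · exact crossL_mat n (n+1) i m h3
      · rfl
    · rfl
  · rw [mat_getD s 0 (n+1) (i-1) (by omega) (by omega),
      mat_set s (n+1) i (s (i-1)) (by omega)]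
    have hm2 : (fun x => if x = i then s (i-1) else s x) = pvSetI s i (s (i-1)) := rfl
    rw [hm2, mat_getD (pvSetI s i (s (i-1))) 0 (n+1) i (by omega) (by omega),
      mat_set (pvSetI s i (s (i-1))) (n+1) (i+1) _ (by omega)]
    rfl

theorem foldA_mat (n : Int) (L : List Int) : ∀ (m : Int → Bool) (s : Int → Int),
    (∀ i ∈ L, 3 ≤ i ∧ i + 1 ≤ n) →
    L.foldl (pvAStepL n) ((PySem.List.pyRange 0 (n+1) 1).map m, (PySem.List.pyRange 0 (n+1) 1).map s)
      = ((PySem.List.pyRange 0 (n+1) 1).map (L.foldl (pvAStep n) (m, s)).1,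
         (PySem.List.pyRange 0 (n+1) 1).map (L.foldl (pvAStep n) (m, s)).2) := by
  induction L with
  | nil => intro m s _; rfl
  | cons i T ih =>
    intro m s h
    obtain ⟨h3, hub⟩ := h i List.mem_cons_self
    simp only [List.foldl_cons]
    rw [stepA_mat n i m s h3 hub]
    rw [ih (pvAStep n (m, s) i).1 (pvAStep n (m, s) i).2 (fun x hx => h x (List.mem_cons_of_mem _ hx))]

theorem init_sums (b : Int) :
    PySem.List.pySetD (List.replicate b.toNat (0 : Int)) 2 2
      = (PySem.List.pyRange 0 b 1).map (pvSetI (fun _ => 0) 2 2) := by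
  have h1 : List.replicate b.toNat (0 : Int) = (PySem.List.pyRange 0 b 1).map (fun _ => 0) := by
    rw [List.map_const', PySem.List.length_pyRange_one]
    norm_num
  rw [h1]
  exact mat_set (fun _ => 0) b 2 2 (by omega)

-- A's mask updates, separated from the fused loop
def pvAMaskStep (n : Int) (m : Int → Bool) (i : Int) : Int → Bool :=
  if m i then (if i * i < n then pvCross n m i else m) else m

-- the sums update of one iteration, reading a FIXED mask M
def pvSumStep (M : Int → Bool) (s : Int → Int) (i : Int) : Int → Int :=
  pvSetI (pvSetI s i (s (i - 1) + (if M i then i else 0))) (i + 1)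
    (s (i - 1) + (if M i then i else 0))

-- cumulative sum of the indices k ≤ N with M k, the common reference value
def pvT (M : Int → Bool) : Nat → Int
  | 0 => 0
  | k + 1 => pvT M k + (if M ((k : Int) + 1) then (k : Int) + 1 else 0)

theorem foldl_setB_ne (L : List Int) : ∀ (m : Int → Bool) (p : Int), (∀ j ∈ L, p ≠ j) →
    (L.foldl (fun m j => pvSetB m j false) m) p = m p := by
  induction L with
  | nil => intro m p _; rfl
  | cons j T ih =>
    intro m p h
    simp only [List.foldl_cons]
    rw [ih _ _ (fun x hx => h x (List.mem_cons_of_mem _ hx))]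
    simp [pvSetB, h j (List.mem_cons_self)]

theorem foldl_setB_mono (L : List Int) : ∀ (m : Int → Bool) (p : Int),
    (L.foldl (fun m j => pvSetB m j false) m) p = true → m p = true := by
  induction L with
  | nil => intro m p h; exact h
  | cons j T ih =>
    intro m p h
    have := ih _ _ h
    simp only [pvSetB] at this
    split at this
    · exact absurd this (by simp)
    · exact this

theorem foldl_setB_mem (L : List Int) : ∀ (m : Int → Bool) (p : Int), p ∈ L →
    (L.foldl (fun m j => pvSetB m j false) m) p = false := by
  induction L with
  | nil => intro m p h; exact absurd h (List.not_mem_nil)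
  | cons j T ih =>
    intro m p h
    simp only [List.foldl_cons]
    by_cases hp : p ∈ T
    · exact ih _ _ hp
    · have hpj : p = j := by rcases List.mem_cons.mp h with h1 | h1; exact h1; exact absurd h1 hp
      subst hpj
      cases hres : (T.foldl (fun m j => pvSetB m j false) (pvSetB m p false)) p
      · rfl
      · have := foldl_setB_mono T _ _ hres
        simp [pvSetB] at this

theorem cross_of_lt (n i : Int) (m : Int → Bool) (p : Int) (h3 : 0 < i) (hp : p < i * i) :
    pvCross n m i p = m p := by
  apply foldl_setB_ne
  intro j hj
  rcases (PySem.List.mem_pyRange_iff_of_pos (by omega : (0:Int) < 2 * i) j).mp hj with ⟨h1, _, _⟩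
  omega

theorem maskA_stable (n : Int) (L : List Int) : ∀ (m : Int → Bool) (p : Int),
    (∀ k ∈ L, 3 ≤ k ∧ p < k * k) → (L.foldl (pvAMaskStep n) m) p = m p := by
  induction L with
  | nil => intro m p _; rfl
  | cons k T ih =>
    intro m p h
    obtain ⟨hk3, hpk⟩ := h k List.mem_cons_self
    simp only [List.foldl_cons]
    rw [ih _ _ (fun x hx => h x (List.mem_cons_of_mem _ hx))]
    unfold pvAMaskStep
    by_cases hm : m k <;> simp [hm]
    split
    · exact cross_of_lt n k m p (by omega) hpk
    · rfl

theorem maskA_mono (n : Int) (L : List Int) : ∀ (m : Int → Bool) (p : Int),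
    (L.foldl (pvAMaskStep n) m) p = true → m p = true := by
  induction L with
  | nil => intro m p h; exact h
  | cons k T ih =>
    intro m p h
    have := ih _ _ h
    unfold pvAMaskStep at this
    split at this
    · split at this
      · exact foldl_setB_mono _ _ _ this
      · exact this
    · exact this

-- crossing at i only touches multiples j of i with i*i ≤ j; a p with no such divisor is untouched
theorem maskA_preserve (n : Int) (L : List Int) : ∀ (m : Int → Bool) (p : Int),
    (∀ i ∈ L, 3 ≤ i) → (∀ e : Int, 3 ≤ e → e * e ≤ p → ¬ e ∣ p) →
    (L.foldl (pvAMaskStep n) m) p = m p := by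
  induction L with
  | nil => intro m p _ _; rfl
  | cons i T ih =>
    intro m p h3 hC
    have hi3 : 3 ≤ i := h3 i List.mem_cons_self
    simp only [List.foldl_cons]
    rw [ih _ _ (fun x hx => h3 x (List.mem_cons_of_mem _ hx)) hC]
    unfold pvAMaskStep
    by_cases hm : m i <;> simp [hm]
    split
    · apply foldl_setB_ne
      intro j hj
      rcases (PySem.List.mem_pyRange_iff_of_pos (by omega : (0:Int) < 2 * i) j).mp hj
        with ⟨h1, _, hdvd⟩
      intro hpj
      subst hpj
      have hidvd : i ∣ p := by
        have h2 : i ∣ p - i * i := dvd_trans ⟨2, by ring⟩ hdvd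
        have := dvd_add h2 (Dvd.intro i rfl)
        simpa using this
      exact hC i hi3 h1 hidvd
    · rfl

theorem pvAStep_fst (n : Int) (m : Int → Bool) (s : Int → Int) (i : Int) :
    (pvAStep n (m, s) i).1 = pvAMaskStep n m i := by
  unfold pvAStep pvAMaskStep; by_cases hm : m i <;> simp [hm]

theorem pvAMaskStep_self (n : Int) (m : Int → Bool) (i : Int) (h3 : 3 ≤ i) :
    (pvAMaskStep n m i) i = m i := by
  have hlt : i < i * i := by nlinarith
  unfold pvAMaskStep
  by_cases hm : m i <;> simp [hm]
  split
  · rw [cross_of_lt n i m i (by omega) hlt, hm]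
  · rw [hm]

theorem pvAStep_snd (n : Int) (m M : Int → Bool) (s : Int → Int) (i : Int)
    (hMi : M i = m i) : (pvAStep n (m, s) i).2 = pvSumStep M s i := by
  unfold pvAStep pvSumStep
  by_cases hm : m i <;> simp [hm, hMi, pvSetI]

theorem fuse (n : Int) (L : List Int) : ∀ (m : Int → Bool) (s : Int → Int),
    (∀ k ∈ L, 3 ≤ k) → L.Pairwise (· ≤ ·) →
    (L.foldl (pvAStep n) (m, s)).2 = L.foldl (pvSumStep (L.foldl (pvAMaskStep n) m)) s := by
  induction L with
  | nil => intro m s _ _; rfl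
  | cons i T ih =>
    intro m s h3 hpair
    have hi3 : 3 ≤ i := h3 i List.mem_cons_self
    have hT3 : ∀ k ∈ T, 3 ≤ k := fun k hk => h3 k (List.mem_cons_of_mem _ hk)
    rw [List.pairwise_cons] at hpair
    obtain ⟨hile, hTpair⟩ := hpair
    have hMi : (T.foldl (pvAMaskStep n) (pvAMaskStep n m i)) i = m i := by
      rw [maskA_stable n T _ i (by
        intro k hk
        have h1 := hT3 k hk
        have h2 := hile k hk
        have : 3 * k ≤ k * k := by nlinarith
        exact ⟨h1, by omega⟩)]
      exact pvAMaskStep_self n m i hi3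
    have hstep : pvAStep n (m, s) i
        = (pvAMaskStep n m i, pvSumStep (T.foldl (pvAMaskStep n) (pvAMaskStep n m i)) s i) := by
      refine Prod.ext ?_ ?_
      · exact pvAStep_fst n m s i
      · exact pvAStep_snd n m _ s i hMi
    simp only [List.foldl_cons]
    rw [hstep, ih _ _ hT3 hTpair]

theorem pvT_succ_int (M : Int → Bool) (a : Int) (ha : 1 ≤ a) :
    pvT M a.toNat = pvT M (a - 1).toNat + (if M a then a else 0) := by
  have h1 : a.toNat = (a - 1).toNat + 1 := by omega
  rw [h1]
  show pvT M ((a-1).toNat + 1) = _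
  simp only [pvT]
  rw [show ((a - 1).toNat : Int) + 1 = a from by omega]

theorem pvT_congr (M M' : Int → Bool) : ∀ (K : Nat),
    (∀ k : Nat, 1 ≤ k → k ≤ K → M (k : Int) = M' (k : Int)) → pvT M K = pvT M' K := by
  intro K
  induction K with
  | zero => intro _; rfl
  | succ K ih =>
    intro h
    simp only [pvT]
    rw [ih (fun k h1 h2 => h k h1 (by omega))]
    have hK := h (K + 1) (by omega) (by omega)
    push_cast at hK
    rw [hK]

theorem sums_char (M : Int → Bool) (hM1 : M 1 = false) (hM2 : M 2 = true)
    (hMeven : ∀ p : Int, p % 2 = 0 → p ≠ 2 → M p = false) :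
    ∀ (N : Nat) (p : Int), 0 ≤ p → p < 3 + 2 * (N : Int) →
      (((List.range N).map (fun k : Nat => (3 : Int) + 2 * (k : Int))).foldl (pvSumStep M)
        (pvSetI (fun _ => 0) 2 2)) p = pvT M p.toNat := by
  have h1' : pvT M 1 = 0 := by
    show pvT M (0 + 1) = 0
    simp only [pvT]
    rw [show ((0:Nat):Int) + 1 = 1 by norm_num, hM1]
    simp
  have h2' : pvT M 2 = 2 := by
    show pvT M (1 + 1) = 2
    rw [pvT]
    rw [show ((1:Nat):Int) + 1 = 2 by norm_num, hM2, h1']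
    simp
  intro N
  induction N with
  | zero =>
    intro p hp0 hp3
    simp only [Nat.cast_zero] at hp3
    interval_cases p
    · exact rfl
    · show (if (1:Int) = 2 then (2:Int) else 0) = pvT M 1
      rw [h1']; norm_num
    · show (if (2:Int) = 2 then (2:Int) else 0) = pvT M 2
      rw [h2']; norm_num
  | succ N ih =>
    intro p hp0 hplt
    rw [List.range_succ, List.map_append, List.foldl_append]
    simp only [List.map_cons, List.map_nil, List.foldl_cons, List.foldl_nil]
    set a : Int := 3 + 2 * (N : Int) with ha
    set sN := ((List.range N).map (fun k : Nat => (3 : Int) + 2 * (k : Int))).foldl (pvSumStep M)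
        (pvSetI (fun _ => 0) 2 2) with hsN
    have hva : sN (a - 1) + (if M a then a else 0) = pvT M a.toNat := by
      rw [ih (a - 1) (by omega) (by omega), pvT_succ_int M a (by omega)]
    have hplt' : p < a + 2 := by push_cast at hplt; omega
    by_cases hp1 : p = a + 1
    · subst hp1
      have h3 : pvT M (a + 1).toNat = pvT M a.toNat + (if M (a + 1) then a + 1 else 0) := by
        rw [pvT_succ_int M (a + 1) (by omega)]; norm_num
      rw [h3, hMeven (a + 1) (by omega) (by omega)]
      simp only [pvSumStep, pvSetI]
      rw [hva]; simp
    · by_cases hp2 : p = a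
      · subst hp2
        simp only [pvSumStep, pvSetI]
        rw [if_neg (by omega : ¬ a = a + 1)]
        simpa using hva
      · simp only [pvSumStep, pvSetI]
        rw [if_neg hp1, if_neg hp2]
        exact ih p hp0 (by omega)

theorem b_fold (M : Int → Bool) : ∀ (b : Int), 1 ≤ b →
    (PySem.List.pyRange 0 b 1).foldl
      (fun (st : Int × List Int) i =>
        (if M i then st.1 + i else st.1, st.2 ++ [if M i then st.1 + i else st.1]))
      ((0 : Int), ([] : List Int))
    = (pvT M (b - 1).toNat, (PySem.List.pyRange 0 b 1).map (fun i => pvT M i.toNat)) := by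
  intro b hb
  induction b, hb using Int.le_induction with
  | base =>
    have h01 : PySem.List.pyRange 0 1 1 = [0] := by decide
    rw [h01]
    have h0 : (if M 0 then (0 : Int) + 0 else 0) = 0 := by cases h : M 0 <;> simp
    simp only [List.foldl_cons, List.foldl_nil, List.map_cons, List.map_nil, h0]
    refine Prod.ext ?_ ?_
    · show (0 : Int) = pvT M ((1:Int) - 1).toNat
      norm_num [pvT]
    · show [] ++ [(0 : Int)] = [pvT M (0:Int).toNat]
      norm_num [pvT]
  | succ b hb ih =>
    rw [PySem.List.pyRange_one_succ_right (by omega : (0:Int) ≤ b), List.foldl_append,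
      List.map_append, ih]
    simp only [List.foldl_cons, List.foldl_nil, List.map_cons, List.map_nil]
    have ht : (if M b then pvT M (b - 1).toNat + b else pvT M (b - 1).toNat) = pvT M b.toNat := by
      rw [pvT_succ_int M b hb]; cases h : M b <;> simp
    rw [show b + 1 - 1 = b from by omega]
    have ht' : (b - 1).toNat = b.toNat - 1 := by omega
    rw [ht'] at ht
    refine Prod.ext ?_ ?_ <;> simp [ht]

-- ---- trial-division characterisation ----

theorem trial_char (i : Int) : ∀ (N : Nat) (d : Int), 1 ≤ d → (i + 3 - d).toNat ≤ N →
    (pvTrial i d = false ↔ ∃ e : Int, d ≤ e ∧ (e - d) % 2 = 0 ∧ e * e ≤ i ∧ e ∣ i) := by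
  intro N
  induction N with
  | zero =>
    intro d hd hN
    have hlt : i < d * d := by
      have h1 : i + 3 - d ≤ 0 := by omega
      have h2 : 0 ≤ (d - 1) * d := mul_nonneg (by omega) (by omega)
      nlinarith
    have htrue : pvTrial i d = true := by rw [pvTrial, if_pos hlt]
    rw [htrue]
    constructor
    · intro h; exact absurd h (by simp)
    · rintro ⟨e, hde, _, hee, _⟩
      exfalso
      have h2 : d * d ≤ e * e := by nlinarith
      linarith
  | succ N ih =>
    intro d hd hN
    rw [pvTrial]
    by_cases hlt : i < d * d
    · rw [if_pos hlt]
      constructor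
      · intro h; exact absurd h (by simp)
      · rintro ⟨e, hde, _, hee, _⟩
        exfalso
        have h2 : d * d ≤ e * e := by nlinarith
        linarith
    · rw [if_neg hlt]
      have hdd : d * d ≤ i := not_lt.mp hlt
      have hdi : d ≤ i := by nlinarith
      by_cases hmod : PySem.Int.mod i d = 0
      · rw [if_pos hmod]
        have hdvd : d ∣ i := (PySem.Int.mod_eq_zero_iff_dvd i d).mp hmod
        simp only [true_iff]
        exact ⟨d, le_refl d, by omega, hdd, hdvd⟩
      · rw [if_neg hmod]
        have hndvd : ¬ d ∣ i := fun h => hmod ((PySem.Int.mod_eq_zero_iff_dvd i d).mpr h)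
        rw [ih (d + 2) (by omega) (by omega)]
        constructor
        · rintro ⟨e, hde, hpar, hee, hdvd⟩
          exact ⟨e, by omega, by omega, hee, hdvd⟩
        · rintro ⟨e, hde, hpar, hee, hdvd⟩
          refine ⟨e, ?_, by omega, hee, hdvd⟩
          have hne : e ≠ d := fun h => hndvd (h ▸ hdvd)
          omega

-- for odd p ≥ 3: B's test is true iff p has no odd divisor e with 3 ≤ e and e*e ≤ p
theorem isPrime_odd (p : Int) (h3 : 3 ≤ p) (hodd : p % 2 = 1) :
    pvIsPrime p = true ↔ ¬ ∃ e : Int, 3 ≤ e ∧ e % 2 = 1 ∧ e * e ≤ p ∧ e ∣ p := by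
  have hm2 : PySem.Int.mod p 2 = p % 2 := PySem.Int.mod_eq_emod_of_pos (by omega)
  unfold pvIsPrime
  rw [if_neg (by omega : ¬ p < 2), if_neg (by omega : ¬ p = 2), hm2,
    if_neg (by omega : ¬ p % 2 = 0)]
  have hchar := trial_char p (p + 3).toNat 3 (by omega) (by omega)
  constructor
  · intro ht ⟨e, he3, hepar, hee, hdvd⟩
    have : pvTrial p 3 = false := hchar.mpr ⟨e, he3, by omega, hee, hdvd⟩
    rw [ht] at this; exact absurd this (by simp)
  · intro hno
    cases h : pvTrial p 3
    · obtain ⟨e, he3, hepar, hee, hdvd⟩ := hchar.mp h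
      exact absurd ⟨e, he3, by omega, hee, hdvd⟩ hno
    · rfl

-- odd p ≥ 3 has an odd divisor 3 ≤ e with e*e ≤ p iff p.toNat is not prime
theorem odd_div_iff_not_prime (p : Int) (h3 : 3 ≤ p) (hodd : p % 2 = 1) :
    (∃ e : Int, 3 ≤ e ∧ e % 2 = 1 ∧ e * e ≤ p ∧ e ∣ p) ↔ ¬ Nat.Prime p.toNat := by
  constructor
  · rintro ⟨e, he3, _, hee, hdvd⟩ hP
    have hep : e < p := by nlinarith
    have hdvdN : e.toNat ∣ p.toNat := by
      have h1 : (e.toNat : Int) ∣ (p.toNat : Int) := by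
        rwa [Int.toNat_of_nonneg (by omega : (0:Int) ≤ e),
          Int.toNat_of_nonneg (by omega : (0:Int) ≤ p)]
      exact_mod_cast h1
    rcases (Nat.Prime.eq_one_or_self_of_dvd hP e.toNat hdvdN) with h | h <;> omega
  · intro hP
    set q : Nat := p.toNat.minFac with hq
    have hqprime : Nat.Prime q := Nat.minFac_prime (by omega : p.toNat ≠ 1)
    have hqdvd : q ∣ p.toNat := Nat.minFac_dvd _
    have hqdvdZ : (q : Int) ∣ p := by
      have := Int.natCast_dvd_natCast.mpr hqdvd
      rwa [Int.toNat_of_nonneg (by omega : (0:Int) ≤ p)] at this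
    have hq2 : q ≠ 2 := by
      intro h
      obtain ⟨c, hc⟩ := hqdvdZ
      rw [h] at hc
      omega
    have hq3 : 3 ≤ q := by
      have := hqprime.two_le
      omega
    have hqodd : (q : Int) % 2 = 1 := by
      obtain ⟨c, hc⟩ := hqdvdZ
      have hq2' : (q : Int) % 2 = 0 ∨ (q : Int) % 2 = 1 := by omega
      rcases hq2' with h | h
      · exfalso
        have : p % 2 = 0 := by
          obtain ⟨t, ht⟩ : (2:Int) ∣ (q:Int) := by omega
          rw [hc, ht]
          have : (2:Int) * t * c = 2 * (t * c) := by ring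
          omega
        omega
      · exact h
    have hsq : q ^ 2 ≤ p.toNat := Nat.minFac_sq_le_self (by omega : 0 < p.toNat) hP
    refine ⟨(q : Int), by exact_mod_cast hq3, hqodd, ?_, hqdvdZ⟩
    have : ((q * q : Nat) : Int) ≤ ((p.toNat : Nat) : Int) := by
      exact_mod_cast (by nlinarith [hsq] : q * q ≤ p.toNat)
    push_cast at this
    rwa [Int.toNat_of_nonneg (by omega : (0:Int) ≤ p)] at this

-- ---- sieve correctness: the final mask agrees with trial division on [1, n] ----

theorem sieve_eq_isPrime (n : Int) (hn2 : 2 ≤ n) (heven : n % 2 = 0)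
    (p : Int) (hp1 : 1 ≤ p) (hpn : p ≤ n) :
    ((PySem.List.pyRange 3 (n + 1) 2).foldl (pvAMaskStep n) pvInitMask) p = pvIsPrime p := by
  set L : List Int := PySem.List.pyRange 3 (n + 1) 2 with hL
  have hLmem : ∀ i, i ∈ L ↔ (3 ≤ i ∧ i < n + 1 ∧ (2:Int) ∣ i - 3) := fun i =>
    PySem.List.mem_pyRange_iff_of_pos (by omega : (0:Int) < 2) i
  have hL3 : ∀ i ∈ L, (3:Int) ≤ i := fun i hi => ((hLmem i).mp hi).1
  by_cases hp2 : p ≤ 2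
  · -- p ∈ {1, 2}: the fold never touches indices below 9
    have hstab : (L.foldl (pvAMaskStep n) pvInitMask) p = pvInitMask p := by
      apply maskA_stable
      intro k hk
      have h3 := hL3 k hk
      exact ⟨h3, by nlinarith⟩
    rw [hstab]
    interval_cases p <;> decide
  · push_neg at hp2
    by_cases hpe : p % 2 = 0
    · -- even p ≥ 4: initial mask is false and false persists
      have hinit : pvInitMask p = false := by
        unfold pvInitMask
        rw [PySem.Int.mod_eq_emod_of_pos (by omega : (0:Int) < 2)]
        simp only [Bool.or_eq_false_iff, Bool.and_eq_false_iff]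
        constructor
        · right; simp [hpe]
        · simp; omega
      have hisp : pvIsPrime p = false := by
        unfold pvIsPrime
        rw [if_neg (by omega : ¬ p < 2), if_neg (by omega : ¬ p = 2),
          PySem.Int.mod_eq_emod_of_pos (by omega : (0:Int) < 2), if_pos hpe]
      rw [hisp]
      cases h : (L.foldl (pvAMaskStep n) pvInitMask) p
      · rfl
      · rw [maskA_mono n L _ p h] at hinit; exact hinit
    · -- odd p ≥ 3
      have hpodd : p % 2 = 1 := by omega
      have hp3 : 3 ≤ p := by omega
      by_cases hdiv : ∃ e : Int, 3 ≤ e ∧ e % 2 = 1 ∧ e * e ≤ p ∧ e ∣ p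
      · -- composite: the sieve crosses p at its least odd prime factor, and B's trial finds one
        have hisp : pvIsPrime p = false := by
          cases h : pvIsPrime p
          · rfl
          · exact absurd hdiv ((isPrime_odd p hp3 hpodd).mp h)
        rw [hisp]
        have hnP : ¬ Nat.Prime p.toNat := (odd_div_iff_not_prime p hp3 hpodd).mp hdiv
        -- q := minFac p: odd prime, 3 ≤ q, q*q ≤ p
        obtain ⟨q, hq3, hqodd, hqq, hqdvd⟩ :
            ∃ q : Int, 3 ≤ q ∧ q % 2 = 1 ∧ q * q ≤ p ∧ (q ∣ p ∧ Nat.Prime q.toNat) := by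
          set q : Nat := p.toNat.minFac with hqdef
          have hqprime : Nat.Prime q := Nat.minFac_prime (by omega : p.toNat ≠ 1)
          have hqdvd : q ∣ p.toNat := Nat.minFac_dvd _
          have hqdvdZ : (q : Int) ∣ p := by
            have := Int.natCast_dvd_natCast.mpr hqdvd
            rwa [Int.toNat_of_nonneg (by omega : (0:Int) ≤ p)] at this
          have hq2 : q ≠ 2 := by
            intro h
            obtain ⟨c, hc⟩ := hqdvdZ
            rw [h] at hc
            omega
          have hq3 : 3 ≤ q := by have := hqprime.two_le; omega
          have hqoddZ : (q : Int) % 2 = 1 := by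
            obtain ⟨c, hc⟩ := hqdvdZ
            have : ¬ (q:Int) % 2 = 0 := by
              intro h
              obtain ⟨t, ht⟩ : (2:Int) ∣ (q:Int) := by omega
              have hpz : p = 2 * (t * c) := by rw [hc, ht]; ring
              omega
            omega
          have hsq : q ^ 2 ≤ p.toNat := Nat.minFac_sq_le_self (by omega : 0 < p.toNat) hnP
          refine ⟨(q:Int), by exact_mod_cast hq3, hqoddZ, ?_, hqdvdZ, by
            simpa using hqprime⟩
          have h1 : ((q * q : Nat) : Int) ≤ ((p.toNat : Nat) : Int) := by
            exact_mod_cast (by nlinarith [hsq] : q * q ≤ p.toNat)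
          push_cast at h1
          rwa [Int.toNat_of_nonneg (by omega : (0:Int) ≤ p)] at h1
        obtain ⟨hqdvd, hqprimeN⟩ := hqdvd
        -- q satisfies the no-divisor condition (q is prime)
        have hCq : ∀ e : Int, 3 ≤ e → e * e ≤ q → ¬ e ∣ q := by
          intro e he3 hee hdvd
          have heq : e < q := by nlinarith
          have hdvdN : e.toNat ∣ q.toNat := by
            have h1 : (e.toNat : Int) ∣ (q.toNat : Int) := by
              rwa [Int.toNat_of_nonneg (by omega : (0:Int) ≤ e),
                Int.toNat_of_nonneg (by omega : (0:Int) ≤ q)]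
            exact_mod_cast h1
          rcases (Nat.Prime.eq_one_or_self_of_dvd hqprimeN e.toNat hdvdN) with h | h <;> omega
        -- q ∈ L; split L there
        have hqmem : q ∈ L := (hLmem q).mpr ⟨hq3, by nlinarith, by omega⟩
        obtain ⟨L1, L2, hLsplit⟩ := List.append_of_mem hqmem
        have hL13 : ∀ i ∈ L1, (3:Int) ≤ i := fun i hi =>
          hL3 i (hLsplit ▸ List.mem_append_left _ hi)
        rw [hLsplit, List.foldl_append, List.foldl_cons]
        -- after L1 the mask at q is still the initial (true) value
        have hm1q : (L1.foldl (pvAMaskStep n) pvInitMask) q = true := by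
          rw [maskA_preserve n L1 pvInitMask q hL13 hCq]
          unfold pvInitMask
          rw [PySem.Int.mod_eq_emod_of_pos (by omega : (0:Int) < 2)]
          simp; omega
        -- the step at q crosses p
        have hqqlt : q * q < n := by
          have h1 : (q * q) % 2 = 1 := by
            rw [Int.mul_emod, hqodd]
            decide
          omega
        have hcrossed : (pvAMaskStep n (L1.foldl (pvAMaskStep n) pvInitMask) q) p = false := by
          set m1 := L1.foldl (pvAMaskStep n) pvInitMask with hm1def
          unfold pvAMaskStep
          rw [hm1q, if_pos rfl, if_pos hqqlt]
          apply foldl_setB_mem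
          refine (PySem.List.mem_pyRange_iff_of_pos (by omega : (0:Int) < 2 * q) p).mpr
            ⟨hqq, by omega, ?_⟩
          obtain ⟨c, hc⟩ := hqdvd
          have hcodd : c % 2 = 1 := by
            have : ¬ c % 2 = 0 := by
              intro h
              obtain ⟨t, ht⟩ : (2:Int) ∣ c := by omega
              have : p = 2 * (q * t) := by rw [hc, ht]; ring
              omega
            omega
          refine ⟨(c - q) / 2, ?_⟩
          have h2 : c - q = 2 * ((c - q) / 2) := by omega
          calc p - q * q = q * (c - q) := by rw [hc]; ring
            _ = q * (2 * ((c - q) / 2)) := by rw [← h2]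
            _ = 2 * q * ((c - q) / 2) := by ring
        -- false persists through L2
        cases h : (L2.foldl (pvAMaskStep n) (pvAMaskStep n (L1.foldl (pvAMaskStep n) pvInitMask) q)) p
        · rfl
        · rw [maskA_mono n L2 _ p h] at hcrossed; exact hcrossed
      · -- no divisor: the sieve never touches p, and B's trial returns true
        have hisp : pvIsPrime p = true := (isPrime_odd p hp3 hpodd).mpr hdiv
        rw [hisp]
        have hC : ∀ e : Int, 3 ≤ e → e * e ≤ p → ¬ e ∣ p := by
          intro e he3 hee hdvd
          rcases Int.emod_two_eq e with h | h
          · -- even divisor of an odd number: impossible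
            obtain ⟨t, ht⟩ : (2:Int) ∣ e := by omega
            obtain ⟨c, hc⟩ := hdvd
            have : p = 2 * (t * c) := by rw [hc, ht]; ring
            omega
          · exact hdiv ⟨e, he3, h, hee, hdvd⟩
        rw [maskA_preserve n L pvInitMask p hL3 hC]
        unfold pvInitMask
        rw [PySem.Int.mod_eq_emod_of_pos (by omega : (0:Int) < 2)]
        simp; omega

-- ===== VERDICT (by name: the statement is the Claim_ definition above) =====

theorem sum_of_primes_quick_draw_spec : Claim_equal_sum_of_primes_quick_draw := by
  unfold Claim_equal_sum_of_primes_quick_draw Pre_sum_of_primes_quick_draw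
    Spec_sum_of_primes_quick_draw
  intro n0 _ hPre
  simp only [sum_of_primes_quick_draw, sum_of_primes_quick_draw_alt]
  set n : Int := if PySem.Int.mod n0 2 ≠ 0 then n0 + 1 else n0 with hn
  have hmod : PySem.Int.mod n0 2 = n0 % 2 := PySem.Int.mod_eq_emod_of_pos (by omega)
  have hne : 2 ≤ n ∧ n % 2 = 0 := by
    rw [hn, hmod]
    by_cases h : n0 % 2 ≠ 0 <;> simp [h] <;> omega
  obtain ⟨hn2, heven⟩ := hne
  set L : List Int := PySem.List.pyRange 3 (n + 1) 2 with hL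
  set M : Int → Bool := L.foldl (pvAMaskStep n) pvInitMask with hM
  -- the odd range as a mapped List.range
  set Nn : Nat := if 3 < n + 1 then ((n + 1 - 3 + 2 - 1) / 2).toNat else 0 with hNn
  have hLmap : L = (List.range Nn).map (fun k : Nat => (3 : Int) + 2 * (k : Int)) := by
    rw [hL, PySem.List.pyRange_of_pos 3 (n + 1) (by omega), hNn]
  have hNval : 3 + 2 * (Nn : Int) = n + 1 := by
    rw [hNn]
    by_cases h : 3 < n + 1 <;> simp [h] <;> omega
  have h3 : ∀ k ∈ L, (3 : Int) ≤ k := by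
    intro k hk
    rw [hLmap] at hk
    obtain ⟨t, _, rfl⟩ := List.mem_map.mp hk
    omega
  have hpair : L.Pairwise (· ≤ ·) := by
    rw [hLmap]
    exact (List.pairwise_map).mpr ((List.pairwise_lt_range).imp (by omega))
  -- final-mask facts needed by sums_char
  have hM1 : M 1 = false := by
    by_contra h
    have h1 := maskA_mono n L pvInitMask 1 (by simpa using h)
    exact absurd h1 (by decide)
  have hM2 : M 2 = true := by
    rw [hM, maskA_stable n L pvInitMask 2 (fun k hk => ⟨h3 k hk, by nlinarith [h3 k hk]⟩)]
    decide
  have hMeven : ∀ p : Int, p % 2 = 0 → p ≠ 2 → M p = false := by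
    intro p hp hp2
    by_contra h
    have h1 := maskA_mono n L pvInitMask p (by simpa using h)
    have hm : PySem.Int.mod p 2 = p % 2 := PySem.Int.mod_eq_emod_of_pos (by omega)
    simp only [pvInitMask, hm, Bool.or_eq_true, Bool.and_eq_true, decide_eq_true_eq] at h1
    rcases h1 with ⟨_, hne0⟩ | h1 <;> omega
  -- every loop index is odd, ≥ 3 and < n (n is even)
  have hbound : ∀ i ∈ L, (3 : Int) ≤ i ∧ i + 1 ≤ n := by
    intro i hi
    rw [hL] at hi
    rcases (PySem.List.mem_pyRange_iff_of_pos (by omega : (0:Int) < 2) i).mp hi with ⟨ha, hb, hd⟩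
    exact ⟨ha, by omega⟩
  -- A's side: materialise the list state, decouple the fused loop, characterise the sums
  rw [init_sums (n + 1), foldA_mat n L pvInitMask (pvSetI (fun _ => 0) 2 2) hbound]
  have hA : (L.foldl (pvAStep n) (pvInitMask, pvSetI (fun _ => 0) 2 2)).2
      = L.foldl (pvSumStep M) (pvSetI (fun _ => 0) 2 2) := by
    rw [fuse n L pvInitMask _ h3 hpair, hM]
  rw [hA]
  -- B's side: the running-total loop is the prefix-sum table of pvIsPrime
  have hBstep : (fun (st : Int × List Int) i =>
        let total := if pvIsPrime i then st.1 + i else st.1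
        (total, st.2 ++ [total]))
      = (fun (st : Int × List Int) i =>
        ((if pvIsPrime i then st.1 + i else st.1),
          st.2 ++ [if pvIsPrime i then st.1 + i else st.1])) := rfl
  rw [hBstep, b_fold pvIsPrime (n + 1) (by omega)]
  -- both sides are prefix-sum tables; the masks agree on [1, n]
  show ((PySem.List.pyRange 0 (n+1) 1).map (L.foldl (pvSumStep M) (pvSetI (fun _ => 0) 2 2)))
      = (PySem.List.pyRange 0 (n+1) 1).map (fun i => pvT pvIsPrime i.toNat)
  apply List.map_congr_left
  intro i hi
  rw [PySem.List.mem_pyRange_one] at hi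
  have hstep1 : (L.foldl (pvSumStep M) (pvSetI (fun _ => 0) 2 2)) i = pvT M i.toNat := by
    rw [hLmap]
    exact sums_char M hM1 hM2 hMeven Nn i hi.1 (by omega)
  rw [hstep1]
  apply pvT_congr
  intro k hk1 hk2
  have hkn : (k : Int) ≤ n := by omega
  exact sieve_eq_isPrime n hn2 heven (k : Int) (by omega) hkn
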